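-- pv_equiv track=rewrite | github.com/Tomasz-Meres/Arrays | 3_30.py | fill_2d_arr
-- ===== SOURCE A (Python) =====
-- def fill_2d_arr(array):
--     # set first column with values
--     n = 1
--     for row in array:
--         row[0] = n
--         n += 1
--
--     # set other values
--     for row in array:
--         for i in range(1,len(row)):
--             row[i] = row[0] * (i+1)
--     return array
-- ===== SOURCE B (Python) =====
-- def fill_2d_arr(array):
--     # Additive-accumulator algorithm: the n-th row (1-based) is the running
--     # sums n, 2n, ..., cn, built by repeated addition (v += n) with no
--     # multiplication or indexing; builds a new list (A mutates in place,
--     # return values are identical).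
--     out = []
--     n = 0
--     for row in array:
--         n += 1
--         new = []
--         v = 0
--         for _ in row:
--             v += n
--             new.append(v)
--         out.append(new)
--     return out
-- ===== Notes on version B (the rewrite author's own statement) =====
-- stated objective: alternative
-- what changed: Replaces A's two in-place mutation passes (seed column 0 via row[0]=n, then re-read row[0] and multiply by the index) with a single pass that builds each row as running sums v += n, using no multiplication and no indexing at all; B builds a new list instead of mutating.
-- crash fix: A raises IndexError whenever some row is empty (row[0] = n on an empty list); B returns the array with that row as an empty list. — e.g. on fill_2d_arr([[1], []]): A raises IndexError, B returns [[1], []]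
import Mathlib
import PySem

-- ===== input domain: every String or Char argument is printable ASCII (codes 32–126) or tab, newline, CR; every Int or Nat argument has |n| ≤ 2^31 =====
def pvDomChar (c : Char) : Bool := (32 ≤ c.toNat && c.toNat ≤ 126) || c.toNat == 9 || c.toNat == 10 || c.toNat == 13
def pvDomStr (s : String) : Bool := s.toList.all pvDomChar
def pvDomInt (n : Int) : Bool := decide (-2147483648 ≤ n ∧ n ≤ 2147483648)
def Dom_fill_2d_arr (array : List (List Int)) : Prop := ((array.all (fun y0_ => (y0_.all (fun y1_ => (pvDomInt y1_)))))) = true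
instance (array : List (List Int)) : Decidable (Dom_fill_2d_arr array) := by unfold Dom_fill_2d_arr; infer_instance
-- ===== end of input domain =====

-- B replaces A's two in-place mutation passes (seed column 0, then re-read
-- row[0] and multiply by the index) with one pass building each row as running
-- sums v += n, with no multiplication or indexing (alternative algorithm).
-- Equivalence is about the RETURN value: A mutates its argument in place,
-- B builds a fresh list.

-- ===== PORT A =====
-- first loop: row[0] = n; n += 1   (row.set 0 n is Python's row[0]=n; the
-- empty-row IndexError case is excluded by Pre_fill_2d_arr)
def fillFirstCol (rows : List (List Int)) (n : Int) : List (List Int) :=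
  match rows with
  | [] => []
  | r :: rs => r.set 0 n :: fillFirstCol rs (n + 1)

-- second loop body: for i in range(1, len(row)): row[i] = row[0] * (i+1)
def fillRestRow (row : List Int) : List Int :=
  (List.range' 1 (row.length - 1)).foldl
    (fun acc i => acc.set i (acc.getD 0 0 * ((i : Int) + 1))) row

def fill_2d_arr (array : List (List Int)) : List (List Int) :=
  (fillFirstCol array 1).map fillRestRow

-- ===== PORT B =====
-- inner loop: v = 0; for _ in row: v += n; new.append(v)
def buildRow (row : List Int) (n v : Int) : List Int :=
  match row with
  | [] => []
  | _ :: t => (v + n) :: buildRow t n (v + n)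

-- outer loop: state (out, n); n += 1; out.append(buildRow row n 0)
def fill_2d_arr_alt (array : List (List Int)) : List (List Int) :=
  (array.foldl (fun (st : List (List Int) × Int) row =>
      (st.1 ++ [buildRow row (st.2 + 1) 0], st.2 + 1)) ([], 0)).1

-- ===== PRECONDITION & SPEC =====
-- Pre_ excludes inputs with an empty row: there Python A raises IndexError.
def Pre_fill_2d_arr (array : List (List Int)) : Prop :=
  ∀ row ∈ array, row ≠ []
instance (array : List (List Int)) : Decidable (Pre_fill_2d_arr array) := by
  unfold Pre_fill_2d_arr; infer_instance

def pvWitness_fill_2d_arr : List (List Int) := [[0, 0], [5], [7, 7, 7]]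

-- A raises IndexError whenever some row is empty (row[0] = n on an empty list);
-- B returns the array with that row as an empty list (theorem fill_2d_arr_raises below).
def Raises_fill_2d_arr (array : List (List Int)) : Prop := ∃ row ∈ array, row = []
instance (array : List (List Int)) : Decidable (Raises_fill_2d_arr array) := by
  unfold Raises_fill_2d_arr; infer_instance
def pvRaiseWitness_fill_2d_arr : List (List Int) := [[1], []]
def pvRaiseWitnessOut_fill_2d_arr : List (List Int) := [[1], []]

def Spec_fill_2d_arr (array : List (List Int)) (out : List (List Int)) : Prop := out = fill_2d_arr_alt array
instance (array : List (List Int)) (out : List (List Int)) : Decidable (Spec_fill_2d_arr array out) := by unfold Spec_fill_2d_arr; infer_instance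

-- ===== CLAIM (what is proved, stated in full; the proofs are below) =====
def Claim_equal_fill_2d_arr : Prop := ∀ (array : List (List Int)), Dom_fill_2d_arr array → Pre_fill_2d_arr array → Spec_fill_2d_arr array (fill_2d_arr array)
def Claim_raises_fill_2d_arr : Prop := (∀ (array : List (List Int)), Dom_fill_2d_arr array → Raises_fill_2d_arr array → ¬ Pre_fill_2d_arr array) ∧ (Dom_fill_2d_arr pvRaiseWitness_fill_2d_arr ∧ Raises_fill_2d_arr pvRaiseWitness_fill_2d_arr ∧ fill_2d_arr_alt pvRaiseWitness_fill_2d_arr = pvRaiseWitnessOut_fill_2d_arr)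

-- ===== LEMMAS AND PROOFS =====

-- A-side: the foldl of independent sets, element-wise
theorem foldl_set_getElem? (n : Int) (l : List Nat) (s : List Int)
    (hpos : ∀ i ∈ l, 1 ≤ i) (h0 : s.getD 0 0 = n) (j : Nat) :
    (l.foldl (fun acc i => acc.set i (acc.getD 0 0 * ((i : Int) + 1))) s)[j]?
      = if j ∈ l ∧ j < s.length then some (n * ((j : Int) + 1)) else s[j]? := by
  induction l generalizing s with
  | nil => simp
  | cons i t ih =>
    have hi : 1 ≤ i := hpos i (by simp)
    have h0' : (s.set i (s.getD 0 0 * ((i : Int) + 1))).getD 0 0 = n := by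
      rcases s with _ | ⟨a, s'⟩
      · simpa using h0
      · have : i ≠ 0 := by omega
        simp [List.getD, this] at h0 ⊢
        simpa [List.getD] using h0
    rw [List.foldl_cons, ih _ (fun k hk => hpos k (by simp [hk])) h0']
    by_cases hjt : j ∈ t
    · have hjc : j ∈ i :: t := List.mem_cons_of_mem _ hjt
      simp only [hjt, hjc, true_and, List.length_set]
      split_ifs with h
      · rfl
      · rw [List.getElem?_eq_none (by simpa using Nat.le_of_not_lt h),
            List.getElem?_eq_none (Nat.le_of_not_lt h)]
    · by_cases hji : j = i
      · subst hji
        by_cases hlt : j < s.length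
        · simp [hjt, hlt, List.length_set]
          exact Or.inl (by simpa [List.getD] using h0)
        · simp [hjt, hlt, List.length_set]
      · simp [hjt, hji, List.length_set, List.getElem?_set_ne (by omega : i ≠ j)]

theorem fillRestRow_set (n : Int) (r : List Int) (hr : r ≠ []) :
    fillRestRow (r.set 0 n) = (List.range r.length).map (fun (i : Nat) => n * ((i : Int) + 1)) := by
  have hlen : (r.set 0 n).length = r.length := List.length_set ..
  have h0 : (r.set 0 n).getD 0 0 = n := by
    rcases r with _ | ⟨a, r'⟩
    · simp at hr
    · simp [List.getD]
  apply List.ext_getElem?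
  intro j
  rw [fillRestRow, foldl_set_getElem? n _ _ (fun i hi => (List.mem_range'_1.mp hi).1) h0 j]
  have hL : 1 ≤ r.length := by
    rcases r with _ | _
    · simp at hr
    · simp
  by_cases hj : j < r.length
  · by_cases hj1 : 1 ≤ j
    · have hmem : j ∈ List.range' 1 (r.length - 1) := List.mem_range'_1.mpr ⟨hj1, by omega⟩
      simp [hmem, hlen, hj]
    · have hj0 : j = 0 := by omega
      subst hj0
      rcases r with _ | ⟨a, r'⟩
      · simp at hr
      · simp
  · have hnm : j ∉ List.range' 1 (r.length - 1) := by
      intro h; have := (List.mem_range'_1.mp h).2; omega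
    simp [hnm, hlen, hj]

-- B-side: running sums are the closed form v + n*(i+1)
theorem buildRow_eq (r : List Int) (n v : Int) :
    buildRow r n v = (List.range r.length).map (fun (i : Nat) => v + n * ((i : Int) + 1)) := by
  induction r generalizing v with
  | nil => simp [buildRow]
  | cons a t ih =>
    simp only [buildRow, ih (v + n), List.length_cons, List.range_succ_eq_map,
      List.map_cons, List.map_map]
    congr 1
    · push_cast; ring
    · apply List.map_congr_left
      intro i _
      simp [Function.comp]
      ring

-- B-side: the outer foldl appends one built row per input row
theorem foldl_build (rows : List (List Int)) (acc : List (List Int)) (k : Nat) :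
    (rows.foldl (fun (st : List (List Int) × Int) row =>
        (st.1 ++ [buildRow row (st.2 + 1) 0], st.2 + 1)) (acc, (k : Int))).1
      = acc ++ (rows.zipIdx (k + 1)).map (fun p =>
          (List.range p.1.length).map (fun (i : Nat) => (p.2 : Int) * ((i : Int) + 1))) := by
  induction rows generalizing acc k with
  | nil => simp
  | cons r t ih =>
    have hc : ((k : Int) + 1) = ((k + 1 : Nat) : Int) := by push_cast; ring
    simp only [List.foldl_cons, hc, ih, List.zipIdx_cons, List.map_cons,
      List.append_assoc, List.singleton_append]
    congr 2
    rw [buildRow_eq]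
    apply List.map_congr_left
    intro i _
    push_cast
    ring

-- combined: A's result in the same closed form
theorem main_lemma (array : List (List Int)) (k : Nat)
    (hpre : ∀ row ∈ array, row ≠ []) :
    (fillFirstCol array (k : Int)).map fillRestRow
      = (array.zipIdx k).map (fun p =>
          (List.range p.1.length).map (fun (i : Nat) => (p.2 : Int) * ((i : Int) + 1))) := by
  induction array generalizing k with
  | nil => simp [fillFirstCol]
  | cons r rs ih =>
    have hr : r ≠ [] := hpre r (by simp)
    have := ih (k + 1) (fun row h => hpre row (by simp [h]))
    simp only [fillFirstCol, List.map_cons, List.zipIdx_cons]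
    rw [fillRestRow_set _ _ hr,
      show ((k : Int) + 1) = ((k + 1 : Nat) : Int) by push_cast; ring, this]

-- ===== VERDICT (by name: the statement is the Claim_ definition above) =====
theorem fill_2d_arr_spec : Claim_equal_fill_2d_arr := by
  intro array _ hpre
  unfold Spec_fill_2d_arr fill_2d_arr fill_2d_arr_alt
  have hb := foldl_build array [] 0
  simp only [Nat.cast_zero, List.nil_append, Nat.zero_add] at hb
  rw [hb]
  simpa using main_lemma array 1 hpre

@[simp] theorem fill_2d_arr_raises : Claim_raises_fill_2d_arr := by
  unfold Claim_raises_fill_2d_arr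
  refine ⟨?_, by decide⟩
  intro array _ ⟨row, hmem, hnil⟩ hpre
  exact hpre row hmem hnil
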